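-- pv_equiv track=rewrite | github.com/tomulanovski/gene2net | scripts/prepare_alloppnet_nexus.py | build_rename_map
-- ===== SOURCE A (Python) =====
-- from collections import defaultdict
--
-- def extract_species(taxon_name):
--     """Extract species name from Species@ID format."""
--     if '@' in taxon_name:
--         return taxon_name.split('@')[0]
--     return taxon_name
--
-- def build_rename_map(taxa_in_file, copy_num_dict):
--     """
--     Map original taxa names to Species_A / Species_B names.
--     Within each species, sort taxa alphabetically before assigning A/B
--     for deterministic results across all gene files.
--     """
--     species_taxa = defaultdict(list)
--     for t in taxa_in_file:
--         species = extract_species(t)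
--         if t not in species_taxa[species]:
--             species_taxa[species].append(t)
--
--     for sp in species_taxa:
--         species_taxa[sp].sort()
--
--     rename_map = {}
--     suffixes = ['_A', '_B', '_C', '_D']
--
--     for species, taxon_list in species_taxa.items():
--         for i, t in enumerate(taxon_list):
--             suffix = suffixes[i] if i < len(suffixes) else f'_{chr(65 + i)}'
--             rename_map[t] = f"{species}{suffix}"
--
--     return rename_map
-- ===== SOURCE B (Python) =====
-- from collections import defaultdict
--
--
-- def extract_species(taxon_name):
--     """Extract species name from Species@ID format."""
--     if '@' in taxon_name:
--         return taxon_name.split('@')[0]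
--     return taxon_name
--
--
-- def build_rename_map(taxa_in_file, copy_num_dict):
--     # Deduplicate once (first occurrences), record each species' first-appearance
--     # rank, then make ONE globally sorted pass assigning letters with a running
--     # per-species counter.  Sorting by (species rank, name) reproduces exactly
--     # the "species in first-appearance order, names sorted within species" order.
--     uniq = list(dict.fromkeys(taxa_in_file))
--     sp_rank = {}
--     for t in uniq:
--         sp = extract_species(t)
--         if sp not in sp_rank:
--             sp_rank[sp] = len(sp_rank)
--     ordered = sorted(uniq, key=lambda t: (sp_rank[extract_species(t)], t))
--     counts = defaultdict(int)
--     rename_map = {}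
--     for t in ordered:
--         sp = extract_species(t)
--         i = counts[sp]
--         counts[sp] = i + 1
--         rename_map[t] = f"{sp}_{chr(65 + i)}"
--     return rename_map
-- ===== Notes on version B (the rewrite author's own statement) =====
-- stated objective: alternative
-- what changed: Replaces the group-into-buckets / sort-each-bucket / enumerate structure with one dedup pass, one global sort keyed by (species first-appearance rank, name), and a single counting pass with a running per-species counter.
import Mathlib
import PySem

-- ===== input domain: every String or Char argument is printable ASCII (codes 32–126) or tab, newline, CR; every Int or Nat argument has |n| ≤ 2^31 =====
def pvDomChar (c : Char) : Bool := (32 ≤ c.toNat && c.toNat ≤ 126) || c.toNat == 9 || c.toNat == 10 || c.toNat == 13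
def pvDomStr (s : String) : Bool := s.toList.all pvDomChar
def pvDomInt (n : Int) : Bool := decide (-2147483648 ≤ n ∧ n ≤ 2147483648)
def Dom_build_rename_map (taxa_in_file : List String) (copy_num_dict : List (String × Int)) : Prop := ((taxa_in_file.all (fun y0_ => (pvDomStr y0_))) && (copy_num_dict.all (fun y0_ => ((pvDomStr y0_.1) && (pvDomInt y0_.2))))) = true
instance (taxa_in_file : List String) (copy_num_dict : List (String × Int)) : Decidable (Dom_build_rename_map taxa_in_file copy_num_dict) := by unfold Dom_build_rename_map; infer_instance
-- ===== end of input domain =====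

-- B replaces A's group-into-buckets/sort-each-bucket/enumerate structure by one dedup pass,
-- one global sort keyed by (species first-appearance rank, name) and a single counting pass
-- (objective: alternative decomposition, same result proved equal).



-- ===== PORT A =====
-- shared helper (both Pythons define the same extract_species)
-- '@' in t -> Str.isIn; t.split('@')[0] -> head of split? (split? is some for the nonempty separator "@",
-- and the resulting list is nonempty, so the defaults below are never used)
def extract_species (t : String) : String :=
  if PySem.Str.isIn "@" t then ((PySem.Str.split? t "@").getD []).headD t else t

-- chr(65 + i) as a one-character string (exact for the code points reached here)
def pyChr (n : Int) : String := String.ofList [Char.ofNat n.toNat]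

def suffixesA : List String := ["_A", "_B", "_C", "_D"]

-- suffix = suffixes[i] if i < len(suffixes) else f'_{chr(65 + i)}'
def suffixA (i : Int) : String :=
  if i < 4 then PySem.List.pyGetD suffixesA i "" else "_" ++ pyChr (65 + i)

-- body of A's first loop: defaultdict access (setdefault) + conditional append
def groupStepA (d : PySem.Dict String (List String)) (t : String) : PySem.Dict String (List String) :=
  let species := extract_species t
  let d := d.setdefault species []
  let cur := d.getD species []
  if t ∈ cur then d else d.insert species (cur ++ [t])

-- body of A's second loop: species_taxa[sp].sort()
def sortStepA (d : PySem.Dict String (List String)) (sp : String) : PySem.Dict String (List String) :=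
  d.modify sp [] (fun l => PySem.List.sorted l (fun x => x))

-- body of A's third (nested) loop
def renameStepA (rm : PySem.Dict String String) (p : String × List String) : PySem.Dict String String :=
  (PySem.List.enumerate p.2).foldl (fun rm q => rm.insert q.2 (p.1 ++ suffixA q.1)) rm

def build_rename_map (taxa_in_file : List String) (copy_num_dict : List (String × Int)) : List (String × String) :=
  let species_taxa := taxa_in_file.foldl groupStepA PySem.Dict.empty
  let species_taxa := species_taxa.keys.foldl sortStepA species_taxa
  let rename_map := species_taxa.items.foldl renameStepA PySem.Dict.empty
  rename_map.items

-- ===== PORT B =====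
-- body of B's rank loop: if sp not in sp_rank: sp_rank[sp] = len(sp_rank)
def rankStepB (d : PySem.Dict String Int) (t : String) : PySem.Dict String Int :=
  let sp := extract_species t
  if d.contains sp then d else d.insert sp (d.size : Int)

-- body of B's counting pass (two accumulators: rename_map, counts)
def countStepB (acc : PySem.Dict String String × PySem.Dict String Int) (t : String) :
    PySem.Dict String String × PySem.Dict String Int :=
  let sp := extract_species t
  let i := acc.2.getD sp 0
  (acc.1.insert t (sp ++ "_" ++ pyChr (65 + i)), acc.2.insert sp (i + 1))

def build_rename_map_alt (taxa_in_file : List String) (copy_num_dict : List (String × Int)) : List (String × String) :=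
  let uniq := PySem.List.dedup taxa_in_file
  let sp_rank := uniq.foldl rankStepB PySem.Dict.empty
  let ordered := PySem.List.sorted2 uniq (fun t => sp_rank.getD (extract_species t) 0) (fun t => t)
  let fin := ordered.foldl countStepB (PySem.Dict.empty, PySem.Dict.empty)
  fin.1.items

-- ===== PRECONDITION & SPEC =====
def Spec_build_rename_map (taxa_in_file : List String) (copy_num_dict : List (String × Int)) (out : List (String × String)) : Prop := out = build_rename_map_alt taxa_in_file copy_num_dict
instance (taxa_in_file : List String) (copy_num_dict : List (String × Int)) (out : List (String × String)) : Decidable (Spec_build_rename_map taxa_in_file copy_num_dict out) := by unfold Spec_build_rename_map; infer_instance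

-- ===== CLAIM (what is proved, stated in full; the proofs are below) =====
def Claim_equal_build_rename_map : Prop := ∀ (taxa_in_file : List String) (copy_num_dict : List (String × Int)), Dom_build_rename_map taxa_in_file copy_num_dict → Spec_build_rename_map taxa_in_file copy_num_dict (build_rename_map taxa_in_file copy_num_dict)

-- ===== LEMMAS AND PROOFS =====

-- the common normal form both ports are reduced to:
-- species in first-appearance order; within a species, its distinct taxa sorted and lettered.
def sfx (i : Int) : String := "_" ++ pyChr (65 + i)

def Grp (taxa : List String) (s : String) : List String :=
  PySem.Set.ofList (taxa.filter (fun t => extract_species t == s))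

def SpL (taxa : List String) : List String :=
  PySem.Set.ofList (taxa.map extract_species)

def blk (taxa : List String) (s : String) : List String :=
  PySem.List.sorted (Grp taxa s) (fun x => x)

def normal (taxa : List String) : List (String × String) :=
  (SpL taxa).flatMap (fun s => (PySem.List.enumerate (blk taxa s)).map (fun q => (q.2, s ++ sfx q.1)))


-- ---------- generic facts ----------

theorem mem_Grp {taxa : List String} {s t : String} :
    t ∈ Grp taxa s ↔ t ∈ taxa ∧ extract_species t = s := by
  simp [Grp, PySem.Set.mem_ofList, List.mem_filter]

theorem nodup_Grp (taxa : List String) (s : String) : (Grp taxa s).Nodup :=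
  PySem.Set.nodup_ofList _

theorem nodup_SpL (taxa : List String) : (SpL taxa).Nodup :=
  PySem.Set.nodup_ofList _

theorem mem_SpL {taxa : List String} {s : String} :
    s ∈ SpL taxa ↔ ∃ t ∈ taxa, extract_species t = s := by
  simp [SpL, PySem.Set.mem_ofList]

theorem mem_blk {taxa : List String} {s t : String} :
    t ∈ blk taxa s ↔ t ∈ taxa ∧ extract_species t = s := by
  rw [blk, PySem.List.mem_sorted, mem_Grp]

theorem nodup_blk (taxa : List String) (s : String) : (blk taxa s).Nodup := by
  rw [blk]
  exact (PySem.List.sorted_perm _ _ _).symm.nodup (nodup_Grp taxa s)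

theorem pairwise_lt_blk (taxa : List String) (s : String) :
    (blk taxa s).Pairwise (fun a b => a < b) := by
  have h1 : (blk taxa s).Pairwise (fun a b : String => a ≤ b) :=
    PySem.List.sorted_pairwise _ (fun x => x)
  have h2 : (blk taxa s).Pairwise (fun a b : String => a ≠ b) := nodup_blk taxa s
  exact (h1.and h2).imp (fun h => lt_of_le_of_ne h.1 h.2)

theorem flat_blk_nodup (taxa : List String) :
    ∀ S : List String, S.Nodup → (S.flatMap (blk taxa)).Nodup := by
  intro S
  induction S with
  | nil => simp
  | cons s S ih =>
    intro hnd
    rw [List.nodup_cons] at hnd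
    rw [List.flatMap_cons, List.nodup_append]
    refine ⟨nodup_blk taxa s, ih hnd.2, ?_⟩
    intro a ha b hb hab
    subst hab
    obtain ⟨s', hs', hb'⟩ := List.mem_flatMap.mp hb
    have h1 := (mem_blk.mp ha).2
    have h2 := (mem_blk.mp hb').2
    exact hnd.1 (by rw [h1.symm.trans h2]; exact hs')

theorem sfx_normal (i : Int) (h : 0 ≤ i) : suffixA i = sfx i := by
  unfold suffixA sfx
  split_ifs with h4
  · have : i = 0 ∨ i = 1 ∨ i = 2 ∨ i = 3 := by omega
    rcases this with h | h | h | h <;> subst h <;> decide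
  · rfl

-- set(xs) and map/filter commute (first-occurrence order preserved)
theorem ofList_map_ofList (f : String → String) :
    ∀ l : List String,
      PySem.Set.ofList ((PySem.Set.ofList l).map f) = PySem.Set.ofList (l.map f) := by
  intro l
  induction l using List.reverseRecOn with
  | nil => rfl
  | append_singleton l x ih =>
    rw [PySem.Set.ofList_append_singleton, List.map_append, List.map_singleton,
        PySem.Set.ofList_append_singleton (l.map f), PySem.Set.add_eq_ite]
    by_cases hx : x ∈ PySem.Set.ofList l
    · rw [if_pos hx, ih]
      refine (PySem.Set.add_of_mem ?_).symm
      rw [PySem.Set.mem_ofList]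
      exact List.mem_map_of_mem (((PySem.Set.mem_ofList _ _)).mp hx)
    · rw [if_neg hx, List.map_append, List.map_singleton,
        PySem.Set.ofList_append_singleton, ih]

theorem ofList_filter (p : String → Bool) :
    ∀ l : List String,
      PySem.Set.ofList (l.filter p) = (PySem.Set.ofList l).filter p := by
  intro l
  induction l using List.reverseRecOn with
  | nil => rfl
  | append_singleton l x ih =>
    rw [List.filter_append, PySem.Set.ofList_append_singleton, PySem.Set.add_eq_ite]
    by_cases hx : x ∈ PySem.Set.ofList l
    · rw [if_pos hx]
      by_cases hp : p x
      · simp only [List.filter_singleton, hp, cond_true]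
        rw [PySem.Set.ofList_append_singleton, ih, PySem.Set.add_of_mem]
        exact List.mem_filter.mpr ⟨hx, hp⟩
      · simp only [List.filter_singleton, hp]
        simpa using ih
    · rw [if_neg hx, List.filter_append, ← ih]
      by_cases hp : p x
      · simp only [List.filter_singleton, hp, cond_true]
        rw [PySem.Set.ofList_append_singleton, PySem.Set.add_of_not_mem]
        intro hmem
        exact hx ((PySem.Set.mem_ofList _ _).mpr (List.mem_filter.mp
          ((PySem.Set.mem_ofList _ _).mp hmem)).1)
      · simp [hp]

-- ---------- port A: the grouping loop ----------

theorem groupStepA_getD (d : PySem.Dict String (List String)) (t s : String) :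
    (groupStepA d t).getD s [] =
      if extract_species t = s then PySem.Set.add (d.getD s []) t else d.getD s [] := by
  unfold groupStepA
  dsimp only
  by_cases h : extract_species t = s
  · rw [if_pos h, h, PySem.Set.add_eq_ite]
    have hcur : (d.setdefault s []).getD s [] = d.getD s [] := PySem.Dict.getD_setdefault_self d s [] []
    rw [hcur]
    by_cases hmem : t ∈ d.getD s []
    · rw [if_pos hmem, if_pos hmem, hcur]
    · rw [if_neg hmem, if_neg hmem, PySem.Dict.getD_insert_self]
  · rw [if_neg h]
    have hget : (d.setdefault (extract_species t) []).getD s [] = d.getD s [] := by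
      rw [PySem.Dict.getD_eq_get?_getD, PySem.Dict.get?_setdefault_of_ne _ _ (fun he => h he.symm), ← PySem.Dict.getD_eq_get?_getD]
    split
    · exact hget
    · rw [PySem.Dict.getD_insert_of_ne (hne := fun he => h he.symm), hget]

theorem groupStepA_keys (d : PySem.Dict String (List String)) (t : String) :
    (groupStepA d t).keys = PySem.Set.add d.keys (extract_species t) := by
  unfold groupStepA
  dsimp only
  rw [PySem.Set.add_eq_ite]
  by_cases hc : d.contains (extract_species t) = true
  · have hmem : extract_species t ∈ d.keys := (PySem.Dict.contains_iff_mem_keys _ _).mp hc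
    have hk : (d.setdefault (extract_species t) []).keys = d.keys := by
      rw [PySem.Dict.keys_setdefault, if_pos hc]
    rw [if_pos hmem]
    split
    · exact hk
    · rw [PySem.Dict.keys_insert_of_contains, hk]
      rw [PySem.Dict.contains_setdefault]
      simp
  · have hc' : d.contains (extract_species t) = false := by
      cases h : d.contains (extract_species t)
      · rfl
      · exact absurd h hc
    have hmem : extract_species t ∉ d.keys := fun hm => hc ((PySem.Dict.contains_iff_mem_keys _ _).mpr hm)
    have hk : (d.setdefault (extract_species t) []).keys = d.keys ++ [extract_species t] := by
      rw [PySem.Dict.keys_setdefault, if_neg (by simp [hc'])]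
    rw [if_neg hmem]
    split
    · exact hk
    · rw [PySem.Dict.keys_insert_of_contains, hk]
      rw [PySem.Dict.contains_setdefault]
      simp

theorem A_group_getD :
    ∀ (l : List String) (d : PySem.Dict String (List String)) (s : String),
      (l.foldl groupStepA d).getD s [] =
        PySem.Set.update (d.getD s []) (l.filter (fun t => extract_species t == s)) := by
  intro l
  induction l with
  | nil => intro d s; simp [PySem.Set.update_nil]
  | cons t l ih =>
    intro d s
    rw [List.foldl_cons, List.filter_cons, ih, groupStepA_getD]
    by_cases h : extract_species t = s
    · simp only [h, beq_self_eq_true, if_true, PySem.Set.update_cons]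
    · simp only [h, if_false, beq_eq_false_iff_ne.mpr h]
      simp [h]

theorem A_group_keys :
    ∀ (l : List String) (d : PySem.Dict String (List String)),
      (l.foldl groupStepA d).keys = PySem.Set.update d.keys (l.map extract_species) := by
  intro l
  induction l with
  | nil => intro d; simp [PySem.Set.update_nil]
  | cons t l ih =>
    intro d
    rw [List.foldl_cons, List.map_cons, PySem.Set.update_cons, ih, groupStepA_keys]

-- ---------- port A: the sorting loop ----------

theorem A_sort_keys :
    ∀ (ks : List String) (d : PySem.Dict String (List String)),
      (∀ k ∈ ks, d.contains k = true) →
      (ks.foldl sortStepA d).keys = d.keys := by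
  intro ks
  induction ks with
  | nil => intro d _; rfl
  | cons k ks ih =>
    intro d hc
    rw [List.foldl_cons]
    have hk : (sortStepA d k).keys = d.keys := by
      unfold sortStepA
      rw [PySem.Dict.keys_modify, PySem.Dict.keys_insert_of_contains (h := hc k (by simp))]
    rw [ih _ ?_, hk]
    intro k' hk'
    unfold sortStepA
    rw [PySem.Dict.contains_modify]
    simp [hc k' (by simp [hk'])]

theorem A_sort_getD :
    ∀ (ks : List String) (d : PySem.Dict String (List String)), ks.Nodup →
      ∀ s, (ks.foldl sortStepA d).getD s [] =
        if s ∈ ks then PySem.List.sorted (d.getD s []) (fun x => x) else d.getD s [] := by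
  intro ks
  induction ks with
  | nil => intro d _ s; simp
  | cons k ks ih =>
    intro d hnd s
    rw [List.nodup_cons] at hnd
    rw [List.foldl_cons, ih _ hnd.2]
    have hm : (sortStepA d k).getD s [] = if s = k then PySem.List.sorted (d.getD k []) (fun x => x) else d.getD s [] := by
      unfold sortStepA
      exact PySem.Dict.getD_modify d k s [] _
    by_cases hks : s ∈ ks
    · have hne : s ≠ k := fun he => hnd.1 (he ▸ hks)
      rw [if_pos hks, if_pos (by simp [hks]), hm, if_neg hne]
    · by_cases hek : s = k
      · subst hek
        rw [if_neg hks, if_pos (by simp), hm, if_pos rfl]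
      · rw [if_neg hks, if_neg (by simp [hek, hks]), hm, if_neg hek]

-- A's dict after the two loops, as items
theorem A_items (taxa : List String) :
    ((((taxa.foldl groupStepA PySem.Dict.empty).keys).foldl sortStepA
        (taxa.foldl groupStepA PySem.Dict.empty)).items) =
      (SpL taxa).map (fun s => (s, blk taxa s)) := by
  set d1 := taxa.foldl groupStepA PySem.Dict.empty with hd1
  have hkeys1 : d1.keys = SpL taxa := by
    rw [hd1, A_group_keys, PySem.Dict.keys_empty, PySem.Set.update_nil_left]; rfl
  have hnd : d1.keys.Nodup := by rw [hkeys1]; exact nodup_SpL taxa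
  have hgetD1 : ∀ s, d1.getD s [] = Grp taxa s := by
    intro s
    rw [hd1, A_group_getD, PySem.Dict.getD_empty, PySem.Set.update_nil_left]; rfl
  set d2 := d1.keys.foldl sortStepA d1 with hd2
  have hkeys2 : d2.keys = d1.keys :=
    A_sort_keys _ _ (fun k hk => (PySem.Dict.contains_iff_mem_keys _ _).mpr hk)
  have hnd2 : d2.keys.Nodup := by rw [hkeys2]; exact hnd
  rw [PySem.Dict.items_eq_map_keys d2 hnd2 [], hkeys2, hkeys1]
  apply List.map_congr_left
  intro s hs
  have : d2.getD s [] = blk taxa s := by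
    rw [hd2, A_sort_getD _ _ hnd s, if_pos (by rw [hkeys1]; exact hs), hgetD1, blk]
  rw [this]

-- the per-pair form of A's rename-loop body
def bigf (p : String × List String) : List (String × String) :=
  (PySem.List.enumerate p.2).map (fun q => (q.2, p.1 ++ suffixA q.1))

theorem portA_eq_normal (taxa : List String) (c : List (String × Int)) :
    build_rename_map taxa c = normal taxa := by
  unfold build_rename_map
  dsimp only
  rw [A_items]
  have hfun : renameStepA = fun rm p => (bigf p).foldl (fun rm pr => rm.insert pr.1 pr.2) rm := by
    funext rm p
    unfold renameStepA bigf
    rw [List.foldl_map]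
  rw [hfun, ← List.foldl_flatMap]
  rw [PySem.Dict.items_foldl_insert_fresh _ Prod.fst Prod.snd PySem.Dict.empty
        (fun a _ => PySem.Dict.contains_empty a.1) ?nodup]
  case nodup =>
    have hmf : (List.map Prod.fst (((SpL taxa).map (fun s => (s, blk taxa s))).flatMap bigf)) =
        (SpL taxa).flatMap (blk taxa) := by
      rw [List.map_flatMap, List.flatMap_map]
      apply List.flatMap_congr
      intro s _
      unfold bigf
      rw [List.map_map]
      exact PySem.List.map_snd_enumerate _ _
    rw [hmf]
    exact flat_blk_nodup taxa _ (nodup_SpL taxa)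
  show ([] : List (String × String)) ++ _ = _
  rw [List.nil_append, List.flatMap_map]
  unfold normal
  simp only [Prod.mk.eta, List.map_id_fun', id]
  apply List.flatMap_congr
  intro s _
  unfold bigf
  apply List.map_congr_left
  intro q hq
  obtain ⟨k, hk, rfl⟩ := (PySem.List.mem_enumerate_iff _ _ _).mp hq
  simp only [Prod.mk.injEq, true_and]
  rw [sfx_normal]
  omega

-- ---------- port B: the rank dictionary ----------

theorem index?_append_right {l : List String} (t : List String) {v : String} (h : v ∉ l) :
    PySem.List.index? (l ++ t) v = (PySem.List.index? t v).map (· + l.length) := by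
  induction l with
  | nil =>
    simp only [List.nil_append, List.length_nil]
    cases PySem.List.index? t v <;> simp
  | cons x l ih =>
    have hx : x ≠ v := fun he => h (he ▸ List.mem_cons_self)
    rw [List.cons_append, PySem.List.index?_cons_of_ne _ hx, ih (fun hm => h (List.mem_cons_of_mem _ hm))]
    cases PySem.List.index? t v <;> simp <;> omega

theorem B_rank_spec :
    ∀ (l : List String) (d : PySem.Dict String Int),
      d.keys.Nodup →
      (∀ s ∈ d.keys, d.getD s 0 = (((PySem.List.index? d.keys s).getD 0 : Nat) : Int)) →
      (l.foldl rankStepB d).keys = PySem.Set.update d.keys (l.map extract_species) ∧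
      (l.foldl rankStepB d).keys.Nodup ∧
      (∀ s ∈ (l.foldl rankStepB d).keys,
        (l.foldl rankStepB d).getD s 0 =
          (((PySem.List.index? ((l.foldl rankStepB d).keys) s).getD 0 : Nat) : Int)) := by
  intro l
  induction l with
  | nil =>
    intro d hnd hinv
    exact ⟨by simp [PySem.Set.update_nil], hnd, hinv⟩
  | cons t l ih =>
    intro d hnd hinv
    rw [List.foldl_cons, List.map_cons, PySem.Set.update_cons]
    by_cases hc : d.contains (extract_species t) = true
    · have hstep : rankStepB d t = d := by
        unfold rankStepB
        dsimp only
        rw [if_pos hc]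
      have hadd : PySem.Set.add d.keys (extract_species t) = d.keys :=
        PySem.Set.add_of_mem ((PySem.Dict.contains_iff_mem_keys _ _).mp hc)
      rw [hstep, hadd]
      exact ih d hnd hinv
    · have hc' : d.contains (extract_species t) = false := by
        cases h : d.contains (extract_species t)
        · rfl
        · exact absurd h hc
      have hnm : extract_species t ∉ d.keys :=
        fun hm => hc ((PySem.Dict.contains_iff_mem_keys _ _).mpr hm)
      have hstep : rankStepB d t = d.insert (extract_species t) (d.size : Int) := by
        unfold rankStepB
        dsimp only
        rw [if_neg (by simp [hc'])]
      have hkeys : (d.insert (extract_species t) (d.size : Int)).keys = d.keys ++ [extract_species t] :=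
        PySem.Dict.keys_insert_of_not_contains d _ hc'
      have hsz : d.size = d.keys.length := by
        simp [PySem.Dict.size, PySem.Dict.keys]
      have hadd : PySem.Set.add d.keys (extract_species t) = d.keys ++ [extract_species t] :=
        PySem.Set.add_of_not_mem hnm
      rw [hstep, hadd, ← hkeys]
      apply ih
      · rw [hkeys, List.nodup_append]
        exact ⟨hnd, List.nodup_singleton _, fun a ha b hb => by
          simp only [List.mem_singleton] at hb
          exact fun he => hnm ((he.trans hb) ▸ ha)⟩
      · intro s hs
        rw [hkeys] at hs
        rcases List.mem_append.mp hs with hs' | hs'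
        · have hne : s ≠ extract_species t := fun he => hnm (he ▸ hs')
          rw [PySem.Dict.getD_insert_of_ne (hne := hne), hkeys,
            PySem.List.index?_append_of_mem _ hs']
          exact hinv s hs'
        · simp only [List.mem_singleton] at hs'
          subst hs'
          rw [PySem.Dict.getD_insert_self, hkeys,
            PySem.List.index?_append_singleton_self _ _ hnm]
          simp [hsz]

-- the global rank of a species: its position in the first-appearance list
def rkv (taxa : List String) (s : String) : Int :=
  ((PySem.List.index? (SpL taxa) s).getD 0 : Nat)

theorem B_rank_final (taxa : List String) :
    ((PySem.List.dedup taxa).foldl rankStepB PySem.Dict.empty).keys = SpL taxa ∧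
    ∀ s ∈ SpL taxa,
      ((PySem.List.dedup taxa).foldl rankStepB PySem.Dict.empty).getD s 0 = rkv taxa s := by
  obtain ⟨hk, _, hv⟩ := B_rank_spec (PySem.List.dedup taxa) PySem.Dict.empty
    (by rw [PySem.Dict.keys_empty]; exact List.nodup_nil) (by intro s hs; simp at hs)
  have hkeys : ((PySem.List.dedup taxa).foldl rankStepB PySem.Dict.empty).keys = SpL taxa := by
    rw [hk, PySem.Dict.keys_empty, PySem.Set.update_nil_left, PySem.List.dedup_eq_ofList,
      ofList_map_ofList]
    rfl
  refine ⟨hkeys, fun s hs => ?_⟩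
  rw [hv s (by rw [hkeys]; exact hs), hkeys, rkv]

theorem rkv_pairwise_aux (L : List String) (hnd : L.Nodup) :
    ∀ (S pre : List String), L = pre ++ S →
      S.Pairwise (fun a b =>
        (((PySem.List.index? L a).getD 0 : Nat) : Int) <
          ((PySem.List.index? L b).getD 0 : Nat)) := by
  intro S
  induction S with
  | nil => intro pre _; exact List.Pairwise.nil
  | cons s S ih =>
    intro pre hL
    rw [List.pairwise_cons]
    have hndL := hnd
    rw [hL, List.nodup_append] at hndL
    obtain ⟨hpre, hcons, hdisj⟩ := hndL
    have hsnp : s ∉ pre := fun hm => hdisj s hm s List.mem_cons_self rfl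
    have hrs : PySem.List.index? L s = some pre.length := by
      rw [hL, index?_append_right _ hsnp, PySem.List.index?_cons_self]
      simp
    constructor
    · intro b hb
      have hbnp : b ∉ pre := fun hm => hdisj b hm b (List.mem_cons_of_mem _ hb) rfl
      have hbs : s ≠ b := by
        rw [List.nodup_cons] at hcons
        exact fun he => hcons.1 (he ▸ hb)
      obtain ⟨k, hk⟩ := Option.isSome_iff_exists.mp ((PySem.List.index?_isSome_iff S b).mpr hb)
      have : PySem.List.index? L b = some (k + 1 + pre.length) := by
        rw [hL, index?_append_right _ hbnp, PySem.List.index?_cons_of_ne _ hbs, hk]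
        rfl
      rw [hrs, this]
      simp only [Option.getD_some]
      omega
    · exact ih (pre ++ [s]) (by rw [hL, List.append_assoc]; rfl)

theorem rkv_pairwise (taxa : List String) :
    (SpL taxa).Pairwise (fun a b => rkv taxa a < rkv taxa b) :=
  rkv_pairwise_aux (SpL taxa) (nodup_SpL taxa) (SpL taxa) [] rfl

-- ---------- port B: the sort ----------

theorem sorted2_as_sorted (xs : List String) (k1 : String → Int) :
    PySem.List.sorted2 xs k1 (fun t => t) =
      PySem.List.sorted xs (fun t => (toLex ((k1 t, t) : Int × String))) := by
  rw [PySem.List.sorted_eq_foldl_insertBy]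
  unfold PySem.List.sorted2
  dsimp only
  simp only [Bool.false_eq_true, if_false]
  have hb : (fun (a b : String) => decide (k1 a < k1 b) || (!decide (k1 b < k1 a) && decide (a < b))) =
      (fun (a b : String) => decide ((toLex ((k1 a, a) : Int × String)) < toLex ((k1 b, b) : Int × String))) := by
    funext a b
    rw [Bool.eq_iff_iff]
    simp only [Bool.or_eq_true, Bool.and_eq_true, Bool.not_eq_eq_eq_not, Bool.not_true,
      decide_eq_true_eq, decide_eq_false_iff_not, Prod.Lex.lt_iff, ofLex_toLex]
    constructor
    · rintro (h | ⟨h1, h2⟩)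
      · exact Or.inl h
      · rcases lt_trichotomy (k1 a) (k1 b) with hlt | heq | hgt
        · exact Or.inl hlt
        · exact Or.inr ⟨heq, h2⟩
        · exact absurd hgt h1
    · rintro (h | ⟨heq, h2⟩)
      · exact Or.inl h
      · exact Or.inr ⟨by rw [heq]; exact lt_irrefl _, h2⟩
  rw [hb]

theorem Grp_eq_filter_dedup (taxa : List String) (s : String) :
    Grp taxa s = (PySem.List.dedup taxa).filter (fun t => extract_species t == s) := by
  rw [Grp, ofList_filter, PySem.List.dedup_eq_ofList]

theorem flatMap_filter_perm :
    ∀ (S : List String) (u : List String), S.Nodup →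
      (∀ t ∈ u, extract_species t ∈ S) →
      (S.flatMap (fun s => u.filter (fun t => extract_species t == s))).Perm u := by
  intro S
  induction S with
  | nil =>
    intro u _ hall
    have : u = [] := List.eq_nil_iff_forall_not_mem.mpr (fun t ht => by simpa using hall t ht)
    simp [this]
  | cons s S ih =>
    intro u hnd hall
    rw [List.nodup_cons] at hnd
    rw [List.flatMap_cons]
    have hcongr : ∀ s' ∈ S,
        u.filter (fun t => extract_species t == s') =
          (u.filter (fun t => !(extract_species t == s))).filter (fun t => extract_species t == s') := by
      intro s' hs'
      rw [List.filter_filter]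
      apply List.filter_congr
      intro t _
      by_cases h : extract_species t = s'
      · have hne : (s' == s) = false := by
          simp only [beq_eq_false_iff_ne]
          intro he
          exact hnd.1 (by rwa [he] at hs')
        simp [h, hne]
      · simp [h]
    rw [List.flatMap_congr hcongr]
    have hsub : ∀ t ∈ u.filter (fun t => !(extract_species t == s)), extract_species t ∈ S := by
      intro t ht
      rw [List.mem_filter] at ht
      rcases List.mem_cons.mp (hall t ht.1) with he | hm
      · exfalso
        have := ht.2
        rw [he] at this
        simp at this
      · exact hm
    have hperm := ih (u.filter (fun t => !(extract_species t == s))) hnd.2 hsub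
    refine List.Perm.trans ?_ (List.filter_append_perm (fun t => extract_species t == s) u)
    exact List.Perm.append_left _ hperm

theorem blocks_perm (taxa : List String) :
    ((SpL taxa).flatMap (blk taxa)).Perm (PySem.List.dedup taxa) := by
  have h2 : ((SpL taxa).flatMap (blk taxa)).Perm ((SpL taxa).flatMap (Grp taxa)) :=
    List.Perm.flatMap (List.Perm.refl _) (fun s _ => PySem.List.sorted_perm _ _ _)
  refine h2.trans ?_
  have : (SpL taxa).flatMap (Grp taxa) =
      (SpL taxa).flatMap (fun s => (PySem.List.dedup taxa).filter (fun t => extract_species t == s)) :=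
    List.flatMap_congr (fun s _ => Grp_eq_filter_dedup taxa s)
  rw [this]
  apply flatMap_filter_perm _ _ (nodup_SpL taxa)
  intro t ht
  rw [PySem.List.dedup_eq_ofList, PySem.Set.mem_ofList] at ht
  exact mem_SpL.mpr ⟨t, ht, rfl⟩

theorem blocks_pairwise (taxa : List String) (g : String → Int) :
    ∀ S : List String, S.Pairwise (fun a b => g a < g b) →
      (S.flatMap (blk taxa)).Pairwise (fun t u =>
        (toLex ((g (extract_species t), t) : Int × String)) <
          toLex ((g (extract_species u), u) : Int × String)) := by
  intro S
  induction S with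
  | nil => intro _; exact List.Pairwise.nil
  | cons s S ih =>
    intro hp
    rw [List.pairwise_cons] at hp
    rw [List.flatMap_cons, List.pairwise_append]
    refine ⟨?_, ih hp.2, ?_⟩
    · apply (pairwise_lt_blk taxa s).imp_of_mem
      intro a b ha hb hlt
      rw [Prod.Lex.lt_iff]
      simp only [ofLex_toLex]
      right
      exact ⟨by simp [(mem_blk.mp ha).2, (mem_blk.mp hb).2], hlt⟩
    · intro a ha b hb
      obtain ⟨s', hs', hb'⟩ := List.mem_flatMap.mp hb
      rw [Prod.Lex.lt_iff]
      simp only [ofLex_toLex]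
      left
      simp only [(mem_blk.mp ha).2, (mem_blk.mp hb').2]
      exact hp.1 s' hs'

-- ---------- port B: the counting pass ----------

theorem B_count_block :
    ∀ (l : List String) (s : String) (rm : PySem.Dict String String) (c : PySem.Dict String Int),
      (∀ t ∈ l, extract_species t = s) → (∀ t ∈ l, rm.contains t = false) → l.Nodup →
      (l.foldl countStepB (rm, c)).1.items
          = rm.items ++ (PySem.List.enumerate l (c.getD s 0)).map (fun q => (q.2, s ++ sfx q.1)) ∧
      (l = [] ∨ (l.foldl countStepB (rm, c)).2 = c.insert s (c.getD s 0 + l.length)) ∧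
      (∀ x, x ∉ l → (l.foldl countStepB (rm, c)).1.contains x = rm.contains x) := by
  intro l
  induction l with
  | nil =>
    intro s rm c _ _ _
    exact ⟨by simp [PySem.List.enumerate_nil], Or.inl rfl, fun x _ => rfl⟩
  | cons t l ih =>
    intro s rm c hsp hfresh hnd
    rw [List.nodup_cons] at hnd
    have hspt : extract_species t = s := hsp t List.mem_cons_self
    have hstep : countStepB (rm, c) t =
        (rm.insert t (s ++ sfx (c.getD s 0)), c.insert s (c.getD s 0 + 1)) := by
      unfold countStepB
      dsimp only
      rw [hspt, sfx, ← String.append_assoc]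
    have hfresh' : ∀ u ∈ l, (rm.insert t (s ++ sfx (c.getD s 0))).contains u = false := by
      intro u hu
      rw [PySem.Dict.contains_insert]
      have : (u == t) = false := by
        simp only [beq_eq_false_iff_ne]
        exact fun he => hnd.1 (he ▸ hu)
      rw [this, hfresh u (List.mem_cons_of_mem _ hu)]
      rfl
    obtain ⟨ih1, ih2, ih3⟩ := ih s (rm.insert t (s ++ sfx (c.getD s 0))) (c.insert s (c.getD s 0 + 1))
      (fun u hu => hsp u (List.mem_cons_of_mem _ hu)) hfresh' hnd.2
    have hins : (rm.insert t (s ++ sfx (c.getD s 0))).items = rm.items ++ [(t, s ++ sfx (c.getD s 0))] :=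
      PySem.Dict.items_insert_of_not_contains _ _ (hfresh t List.mem_cons_self)
    have hgetD1 : (c.insert s (c.getD s 0 + 1)).getD s 0 = c.getD s 0 + 1 :=
      PySem.Dict.getD_insert_self _ _ _ _
    refine ⟨?_, ?_, ?_⟩
    · rw [List.foldl_cons, hstep, ih1, hins, PySem.List.enumerate_cons, List.map_cons,
        hgetD1, List.append_assoc]
      rfl
    · right
      rw [List.foldl_cons, hstep]
      rcases ih2 with hnil | hval
      · subst hnil
        simp only [List.foldl_nil, List.length_cons, List.length_nil]
        rfl
      · rw [hval, hgetD1, PySem.Dict.insert_insert_self]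
        congr 1
        simp only [List.length_cons]
        push_cast
        ring
    · intro x hx
      rw [List.foldl_cons, hstep, ih3 x (fun hm => hx (List.mem_cons_of_mem _ hm)),
        PySem.Dict.contains_insert]
      have : (x == t) = false := by
        simp only [beq_eq_false_iff_ne]
        exact fun he => hx (he ▸ List.mem_cons_self)
      rw [this]
      rfl

theorem B_count_flat (taxa : List String) :
    ∀ (S : List String) (rm : PySem.Dict String String) (c : PySem.Dict String Int),
      S.Nodup →
      (∀ s ∈ S, c.getD s 0 = 0) →
      (∀ s ∈ S, ∀ t ∈ blk taxa s, rm.contains t = false) →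
      ((S.flatMap (blk taxa)).foldl countStepB (rm, c)).1.items
        = rm.items ++ S.flatMap (fun s =>
            (PySem.List.enumerate (blk taxa s)).map (fun q => (q.2, s ++ sfx q.1))) := by
  intro S
  induction S with
  | nil => intro rm c _ _ _; simp
  | cons s S ih =>
    intro rm c hnd hc0 hfresh
    rw [List.nodup_cons] at hnd
    rw [List.flatMap_cons, List.foldl_append]
    obtain ⟨hb1, hb2, hb3⟩ := B_count_block (blk taxa s) s rm c
      (fun t ht => (mem_blk.mp ht).2) (hfresh s List.mem_cons_self) (nodup_blk taxa s)
    set P := ((blk taxa s).foldl countStepB (rm, c)) with hP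
    have hPeta : P = (P.1, P.2) := rfl
    rw [hPeta, ih P.1 P.2 hnd.2 ?c0 ?fr, hb1, hc0 s List.mem_cons_self,
      List.flatMap_cons, List.append_assoc]
    case c0 =>
      intro s' hs'
      rcases hb2 with hnil | hval
      · have hPc : P.2 = c := by rw [hP, hnil, List.foldl_nil]
        rw [hPc]
        exact hc0 s' (List.mem_cons_of_mem _ hs')
      · rw [hval, PySem.Dict.getD_insert_of_ne (hne := fun he => hnd.1 (by rw [← he]; exact hs'))]
        exact hc0 s' (List.mem_cons_of_mem _ hs')
    case fr =>
      intro s' hs' t ht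
      have hts' : extract_species t = s' := (mem_blk.mp ht).2
      have hnotin : t ∉ blk taxa s := by
        intro hm
        have h1 : s = s' := ((mem_blk.mp hm).2).symm.trans hts'
        rw [h1] at hnd
        exact hnd.1 hs' 
      rw [hb3 t hnotin]
      exact hfresh s' (List.mem_cons_of_mem _ hs') t ht

theorem portB_eq_normal (taxa : List String) (c : List (String × Int)) :
    build_rename_map_alt taxa c = normal taxa := by
  unfold build_rename_map_alt
  dsimp only
  obtain ⟨hrk, hrv⟩ := B_rank_final taxa
  have hord : PySem.List.sorted2 (PySem.List.dedup taxa)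
      (fun t => ((PySem.List.dedup taxa).foldl rankStepB PySem.Dict.empty).getD (extract_species t) 0)
      (fun t => t) = (SpL taxa).flatMap (blk taxa) := by
    rw [sorted2_as_sorted]
    apply PySem.List.sorted_eq_of_perm_of_pairwise_lt _ _ _ (blocks_perm taxa)
    apply (blocks_pairwise taxa (rkv taxa) (SpL taxa) (rkv_pairwise taxa)).imp_of_mem
    intro a b ha hb hlt
    have hspa : extract_species a ∈ SpL taxa := by
      obtain ⟨s', hs', ha'⟩ := List.mem_flatMap.mp ha
      rw [(mem_blk.mp ha').2]
      exact hs'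
    have hspb : extract_species b ∈ SpL taxa := by
      obtain ⟨s', hs', hb'⟩ := List.mem_flatMap.mp hb
      rw [(mem_blk.mp hb').2]
      exact hs'
    rw [hrv _ hspa, hrv _ hspb]
    exact hlt
  rw [hord, B_count_flat taxa (SpL taxa) PySem.Dict.empty PySem.Dict.empty (nodup_SpL taxa)
    (fun s _ => PySem.Dict.getD_empty s 0) (fun s _ t _ => PySem.Dict.contains_empty t)]
  rfl

-- ===== VERDICT (by name: the statement is the Claim_ definition above) =====
theorem build_rename_map_spec : Claim_equal_build_rename_map := by
  intro taxa c _
  unfold Spec_build_rename_map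
  rw [portA_eq_normal, portB_eq_normal]
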